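-- pv_equiv track=rewrite | github.com/MaikeZuefle/contr-pretraining | llava/dataset/organise_wordboundaries.py | distribute_uniform
-- ===== SOURCE A (Python) =====
-- def distribute_uniform(words, tokenized_text, sr):
--     result = {"subword_indices": []}
--
--     base_tokens_per_tensor = len(tokenized_text) // len(words)
--     extra_tokens = len(tokenized_text) % len(words)
--     subword_indices = []
--     start_index = 0
--
--     for i in range(len(words)):
--         # Determine the end index for each tensor
--         end_index = start_index + base_tokens_per_tensor
--         if i < extra_tokens:
--             end_index += 1  # Distribute the extra tokens evenly
--
--         # Append the subwords to the subword_indices list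
--         subword_indices.append(tokenized_text[start_index:end_index])
--
--         # Update the start index for the next tensor
--         start_index = end_index
--
--     result["subword_indices"] = subword_indices
--     return result
-- ===== SOURCE B (Python) =====
-- def distribute_uniform(words, tokenized_text, sr):
--     base = len(tokenized_text) // len(words)
--     extra = len(tokenized_text) % len(words)
--     # phase 1: explicit table of cut points
--     boundaries = [i * base + min(i, extra) for i in range(len(words) + 1)]
--     # phase 2: slice between consecutive boundaries
--     subword_indices = [tokenized_text[boundaries[i]:boundaries[i + 1]]
--                        for i in range(len(words))]
--     return {"subword_indices": subword_indices}
-- ===== Notes on version B (the rewrite author's own statement) =====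
-- stated objective: alternative
-- what changed: Replaces the running start_index accumulator loop by a precomputed table of cut points boundaries[i] = i*base + min(i, extra), followed by a separate pass slicing between consecutive boundaries.
import Mathlib
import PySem

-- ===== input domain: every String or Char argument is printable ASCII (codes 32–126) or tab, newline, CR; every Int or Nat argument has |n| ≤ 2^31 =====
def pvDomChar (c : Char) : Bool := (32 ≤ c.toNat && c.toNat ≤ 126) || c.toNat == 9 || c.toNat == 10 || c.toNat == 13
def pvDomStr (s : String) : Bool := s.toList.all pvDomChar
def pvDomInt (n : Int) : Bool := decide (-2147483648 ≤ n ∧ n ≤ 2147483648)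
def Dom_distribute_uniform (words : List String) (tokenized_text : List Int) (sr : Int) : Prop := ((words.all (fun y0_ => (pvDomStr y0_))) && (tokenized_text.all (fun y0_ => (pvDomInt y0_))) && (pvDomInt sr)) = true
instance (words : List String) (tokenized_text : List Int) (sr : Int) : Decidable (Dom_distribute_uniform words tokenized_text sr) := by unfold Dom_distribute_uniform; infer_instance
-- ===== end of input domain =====

-- B replaces A's running start_index loop by a precomputed boundaries table plus a slicing pass.

-- ===== PORT A =====
-- literal port of A: running-accumulator loop over range(len(words))
def distribute_uniform (words : List String) (tokenized_text : List Int) (sr : Int) : List (String × List (List Int)) :=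
  let base : Int := PySem.Int.floordiv (tokenized_text.length : Int) (words.length : Int)
  let extra : Int := PySem.Int.mod (tokenized_text.length : Int) (words.length : Int)
  let st := (PySem.List.pyRange 0 (words.length : Int) 1).foldl
    (fun (st : List (List Int) × Int) i =>
      let end0 := st.2 + base
      let endIdx := if i < extra then end0 + 1 else end0
      (st.1 ++ [PySem.List.slice tokenized_text (some st.2) (some endIdx)], endIdx))
    ([], 0)
  [("subword_indices", st.1)]

-- ===== PORT B =====
-- literal port of B: boundaries table, then slice between consecutive boundaries
def distribute_uniform_alt (words : List String) (tokenized_text : List Int) (sr : Int) : List (String × List (List Int)) :=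
  let base : Int := PySem.Int.floordiv (tokenized_text.length : Int) (words.length : Int)
  let extra : Int := PySem.Int.mod (tokenized_text.length : Int) (words.length : Int)
  let boundaries : List Int :=
    (PySem.List.pyRange 0 ((words.length : Int) + 1) 1).map (fun i => i * base + min i extra)
  let subword_indices : List (List Int) :=
    (PySem.List.pyRange 0 (words.length : Int) 1).map (fun i =>
      PySem.List.slice tokenized_text
        (some (PySem.List.pyGetD boundaries i 0))
        (some (PySem.List.pyGetD boundaries (i + 1) 0)))
  [("subword_indices", subword_indices)]

-- ===== PRECONDITION & SPEC =====
-- Pre_ excludes words = [], on which A raises ZeroDivisionError (len(tokenized_text) // len(words)).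
def Pre_distribute_uniform (words : List String) (tokenized_text : List Int) (sr : Int) : Prop := words ≠ []
instance (words : List String) (tokenized_text : List Int) (sr : Int) : Decidable (Pre_distribute_uniform words tokenized_text sr) := by unfold Pre_distribute_uniform; infer_instance
def pvWitness_distribute_uniform : List String × List Int × Int := (["ab", "c"], [1, 2, 3], 0)

def Spec_distribute_uniform (words : List String) (tokenized_text : List Int) (sr : Int) (out : List (String × List (List Int))) : Prop := out = distribute_uniform_alt words tokenized_text sr
instance (words : List String) (tokenized_text : List Int) (sr : Int) (out : List (String × List (List Int))) : Decidable (Spec_distribute_uniform words tokenized_text sr out) := by unfold Spec_distribute_uniform; infer_instance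

-- ===== CLAIM (what is proved, stated in full; the proofs are below) =====
def Claim_equal_distribute_uniform : Prop := ∀ (words : List String) (tokenized_text : List Int) (sr : Int), Dom_distribute_uniform words tokenized_text sr → Pre_distribute_uniform words tokenized_text sr → Spec_distribute_uniform words tokenized_text sr (distribute_uniform words tokenized_text sr)

-- ===== LEMMAS AND PROOFS =====

-- A's loop invariant: starting the fold at index a with start_index = a*base + min a extra.
theorem du_loop_inv (tt : List Int) (base extra m : Int)
    (acc : List (List Int)) (a : Int) (ha : 0 ≤ a) (ham : a ≤ m) :
    (PySem.List.pyRange a m 1).foldl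
      (fun (st : List (List Int) × Int) i =>
        let end0 := st.2 + base
        let endIdx := if i < extra then end0 + 1 else end0
        (st.1 ++ [PySem.List.slice tt (some st.2) (some endIdx)], endIdx))
      (acc, a * base + min a extra)
    = (acc ++ (PySem.List.pyRange a m 1).map (fun i =>
          PySem.List.slice tt (some (i * base + min i extra))
            (some ((i + 1) * base + min (i + 1) extra))),
       m * base + min m extra) := by
  generalize hk : (m - a).toNat = k
  induction k generalizing a acc with
  | zero =>
      have : a = m := by omega
      subst this
      simp [PySem.List.pyRange_one_eq_nil le_rfl]
  | succ k ih =>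
      have ham' : a < m := by omega
      rw [PySem.List.pyRange_one_cons ham']
      simp only [List.foldl_cons, List.map_cons]
      have hstep : (if a < extra then a * base + min a extra + base + 1
                    else a * base + min a extra + base)
                    = (a + 1) * base + min (a + 1) extra := by
        by_cases h : a < extra
        · have h1 : min a extra = a := by omega
          have h2 : min (a + 1) extra = a + 1 := by omega
          rw [if_pos h, h1, h2]; ring
        · have h1 : min a extra = min (a + 1) extra := by omega
          rw [if_neg h, h1]; ring
      rw [hstep,
          ih (acc ++ [PySem.List.slice tt (some (a * base + min a extra))
            (some ((a + 1) * base + min (a + 1) extra))]) (a + 1) (by omega) (by omega) (by omega)]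
      simp [List.append_assoc]

-- ===== VERDICT (by name: the statement is the Claim_ definition above) =====
theorem distribute_uniform_spec : Claim_equal_distribute_uniform := by
  intro words tt sr _ hpre
  unfold Spec_distribute_uniform distribute_uniform distribute_uniform_alt
  simp only
  set base := PySem.Int.floordiv (tt.length : Int) (words.length : Int) with hbase
  set extra := PySem.Int.mod (tt.length : Int) (words.length : Int) with hextra
  have hm : 0 < (words.length : Int) := by
    have : words.length ≠ 0 := by simpa [List.length_eq_zero_iff] using hpre
    omega
  have hx : 0 ≤ extra := hextra ▸ PySem.Int.mod_nonneg _ hm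
  have h0 : (0 : Int) * base + min 0 extra = 0 := by
    simp [min_eq_left hx]
  have key := du_loop_inv tt base extra (words.length : Int) [] 0 (le_refl 0) (by positivity)
  rw [h0] at key
  rw [key]
  simp only [List.nil_append, List.cons.injEq, Prod.mk.injEq, and_true, true_and]
  apply List.map_congr_left
  intro i hi
  rw [PySem.List.mem_pyRange_one] at hi
  rw [PySem.List.pyGetD_map_pyRange_of_nonneg _ _ _ _ hi.1 (by omega),
      PySem.List.pyGetD_map_pyRange_of_nonneg _ _ _ _ (by omega) (by omega)]
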